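-- pv_equiv track=rewrite | github.com/HaoranMa1023/OASVD | core/metrics.py | false_alarm_count
-- ===== SOURCE A (Python) =====
-- from typing import Sequence, Mapping
--
-- def false_alarm_count(true_changes: Sequence[int],
--                       detected_changes: Sequence[int],
--                       tolerance: int = 0) -> int:
--     """Count the number of false alarms among detected change times.
--
--     A detected time is considered a true positive if it lies within
--     ``[t* - tolerance, t* + tolerance]`` of any true change ``t*``.
--     All other detected times are counted as false alarms.
--
--     Parameters
--     ----------
--     true_changes : sequence of int
--         Ground-truth change times.
--     detected_changes : sequence of int
--         Times at which the algorithm raises a change / probe alarm.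
--     tolerance : int, optional
--         Symmetric window around each true change within which detections
--         are considered correct.  Default is 0 (exact match).
--
--     Returns
--     -------
--     n_false : int
--         Number of detected times that are not matched to any true change.
--     """
--     if not detected_changes:
--         return 0
--     true_changes = list(true_changes)
--     n_false = 0
--     for t in detected_changes:
--         ok = any(abs(t - t_star) <= tolerance for t_star in true_changes)
--         if not ok:
--             n_false += 1
--     return int(n_false)
-- ===== SOURCE B (Python) =====
-- def false_alarm_count(true_changes, detected_changes, tolerance=0):
--     """Sort the true changes once, then binary-search each detected time:
--     t is a true positive iff the first sorted true change >= t - tolerance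
--     exists and is <= t + tolerance."""
--     s = sorted(true_changes)
--     n_false = 0
--     for t in detected_changes:
--         lo, hi = 0, len(s)
--         x = t - tolerance
--         while lo < hi:
--             mid = (lo + hi) // 2
--             if s[mid] < x:
--                 lo = mid + 1
--             else:
--                 hi = mid
--         if not (lo < len(s) and s[lo] <= t + tolerance):
--             n_false += 1
--     return n_false
-- ===== Notes on version B (the rewrite author's own statement) =====
-- stated objective: faster
-- what changed: B sorts the true change times once and replaces A's inner linear scan over all true changes by a hand-written binary search for the first true change >= t - tolerance.
import Mathlib
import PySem

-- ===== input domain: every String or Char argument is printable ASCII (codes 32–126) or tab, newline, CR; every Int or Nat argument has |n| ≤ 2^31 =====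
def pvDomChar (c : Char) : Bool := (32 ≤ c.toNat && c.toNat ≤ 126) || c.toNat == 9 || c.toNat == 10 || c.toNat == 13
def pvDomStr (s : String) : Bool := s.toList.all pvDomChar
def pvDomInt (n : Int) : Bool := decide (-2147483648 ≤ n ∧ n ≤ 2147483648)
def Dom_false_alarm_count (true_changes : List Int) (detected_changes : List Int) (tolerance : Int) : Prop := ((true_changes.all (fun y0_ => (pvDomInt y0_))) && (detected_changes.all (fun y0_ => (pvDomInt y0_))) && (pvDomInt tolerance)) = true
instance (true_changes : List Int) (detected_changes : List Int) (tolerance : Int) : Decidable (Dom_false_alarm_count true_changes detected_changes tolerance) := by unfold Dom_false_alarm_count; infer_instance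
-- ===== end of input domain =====

-- B sorts the true change times once and replaces A's inner linear scan by a
-- binary search for the first sorted true change ≥ t - tolerance (objective: faster).

-- ===== PORT A =====
def false_alarm_count (true_changes : List Int) (detected_changes : List Int) (tolerance : Int) : Int :=
  if detected_changes = [] then 0
  else
    -- n_false accumulated over detected_changes; inner `any` over true_changes
    detected_changes.foldl
      (fun n_false t =>
        if true_changes.any (fun t_star => decide (|t - t_star| ≤ tolerance)) then n_false
        else n_false + 1)
      0

-- ===== PORT B =====
-- hand-written binary search from Source B: while lo < hi: mid = (lo+hi)//2; …
def pvBisect (s : List Int) (x : Int) (lo hi : Nat) : Nat :=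
  if h : lo < hi then
    let mid := (lo + hi) / 2
    if s.getD mid 0 < x then pvBisect s x (mid + 1) hi
    else pvBisect s x lo mid
  else lo
termination_by hi - lo
decreasing_by all_goals omega

def false_alarm_count_alt (true_changes : List Int) (detected_changes : List Int) (tolerance : Int) : Int :=
  let s := PySem.List.sorted true_changes (fun x => x) false
  detected_changes.foldl
    (fun n_false t =>
      let lo := pvBisect s (t - tolerance) 0 s.length
      if lo < s.length ∧ s.getD lo 0 ≤ t + tolerance then n_false
      else n_false + 1)
    0

-- ===== PRECONDITION & SPEC =====
def Spec_false_alarm_count (true_changes : List Int) (detected_changes : List Int) (tolerance : Int) (out : Int) : Prop := out = false_alarm_count_alt true_changes detected_changes tolerance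
instance (true_changes : List Int) (detected_changes : List Int) (tolerance : Int) (out : Int) : Decidable (Spec_false_alarm_count true_changes detected_changes tolerance out) := by unfold Spec_false_alarm_count; infer_instance

-- ===== CLAIM (what is proved, stated in full; the proofs are below) =====
def Claim_equal_false_alarm_count : Prop := ∀ (true_changes : List Int) (detected_changes : List Int) (tolerance : Int), Dom_false_alarm_count true_changes detected_changes tolerance → Spec_false_alarm_count true_changes detected_changes tolerance (false_alarm_count true_changes detected_changes tolerance)

-- ===== LEMMAS AND PROOFS =====

-- binary-search invariant: everything below the result is < x, everything from it on is ≥ x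
theorem pvBisect_spec (s : List Int) (x : Int) (lo hi : Nat)
    (hhi : hi ≤ s.length)
    (hmono : ∀ p q : Nat, (hpq : p ≤ q) → (hq : q < s.length) → s[p]'(Nat.lt_of_le_of_lt hpq hq) ≤ s[q])
    (hlo : ∀ j : Nat, j < lo → (hj : j < s.length) → s[j] < x)
    (hhi2 : ∀ j : Nat, hi ≤ j → (hj : j < s.length) → x ≤ s[j]) :
    (∀ j : Nat, j < pvBisect s x lo hi → (hj : j < s.length) → s[j] < x) ∧
    (∀ j : Nat, pvBisect s x lo hi ≤ j → (hj : j < s.length) → x ≤ s[j]) := by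
  fun_induction pvBisect s x lo hi with
  | case1 lo hi h mid hlt ih =>
    apply ih hhi
    · intro j hj hjs
      have hmid : mid < s.length := by simp only [mid]; omega
      have hsj : s[j] ≤ s[mid]'hmid := hmono j mid (by simp only [mid]; omega) hmid
      simp only [List.getD_eq_getElem?_getD, List.getElem?_eq_getElem hmid] at hlt
      simp only [Option.getD_some] at hlt
      have hjm : j < mid + 1 := hj
      rcases Nat.lt_or_ge j mid with h1 | h1
      · omega
      · have : j = mid := by omega
        subst this; omega
    · exact hhi2
  | case2 lo hi h mid hge ih =>
    apply ih (by simp only [mid]; omega) hlo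
    intro j hj hjs
    have hmid : mid < s.length := by simp only [mid] at hj ⊢; omega
    have hsj : s[mid]'hmid ≤ s[j] := hmono mid j hj hjs
    simp only [List.getD_eq_getElem?_getD, List.getElem?_eq_getElem hmid] at hge
    simp only [Option.getD_some, not_lt] at hge
    omega
  | case3 lo hi h =>
    exact ⟨hlo, fun j hj hjs => hhi2 j (by omega) hjs⟩

-- the binary-search membership test equals "some element of s is within tolerance of t"
theorem bisect_check_iff (s : List Int) (t tolerance : Int)
    (hsort : s.Pairwise (· ≤ ·)) :
    ((pvBisect s (t - tolerance) 0 s.length < s.length ∧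
      s.getD (pvBisect s (t - tolerance) 0 s.length) 0 ≤ t + tolerance)
      ↔ ∃ y ∈ s, |t - y| ≤ tolerance) := by
  have hmono : ∀ p q : Nat, (hpq : p ≤ q) → (hq : q < s.length) →
      s[p]'(Nat.lt_of_le_of_lt hpq hq) ≤ s[q] := by
    intro p q hpq hq
    rcases Nat.lt_or_ge p q with hlt | hge
    · exact List.pairwise_iff_getElem.mp hsort p q (by omega) hq hlt
    · have : p = q := by omega
      subst this; exact le_refl _
  set x := t - tolerance with hx
  set i := pvBisect s x 0 s.length with hi
  obtain ⟨hbelow, habove⟩ := pvBisect_spec s x 0 s.length (le_refl _) hmono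
    (by intro j hj _; omega) (by intro j hj hjs; omega)
  constructor
  · rintro ⟨hil, hle⟩
    refine ⟨s[i]'hil, List.getElem_mem hil, ?_⟩
    have h1 : x ≤ s[i]'hil := habove i (le_refl _) hil
    simp only [List.getD_eq_getElem?_getD, List.getElem?_eq_getElem hil,
      Option.getD_some] at hle
    rw [abs_le]; omega
  · rintro ⟨y, hy, hyt⟩
    obtain ⟨j, hjs, rfl⟩ := List.getElem_of_mem hy
    rw [abs_le] at hyt
    have hji : i ≤ j := by
      by_contra hc
      have := hbelow j (by omega) hjs
      omega
    have hil : i < s.length := by omega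
    refine ⟨hil, ?_⟩
    have : s[i]'hil ≤ s[j]'hjs := hmono i j hji hjs
    simp only [List.getD_eq_getElem?_getD, List.getElem?_eq_getElem hil,
      Option.getD_some]
    omega

-- the two fold steps agree, with s any sorted rearrangement of true_changes
theorem fold_eq (s : List Int) (true_changes : List Int) (detected_changes : List Int)
    (tolerance : Int) (n : Int)
    (hsort : s.Pairwise (· ≤ ·))
    (hmem : ∀ y : Int, y ∈ s ↔ y ∈ true_changes) :
    detected_changes.foldl
      (fun n_false t =>
        if true_changes.any (fun t_star => decide (|t - t_star| ≤ tolerance)) then n_false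
        else n_false + 1) n
    = detected_changes.foldl
      (fun n_false t =>
        let lo := pvBisect s (t - tolerance) 0 s.length
        if lo < s.length ∧ s.getD lo 0 ≤ t + tolerance then n_false
        else n_false + 1) n := by
  induction detected_changes generalizing n with
  | nil => rfl
  | cons t rest ih =>
    simp only [List.foldl_cons]
    rw [← ih]
    congr 1
    have hiff : (pvBisect s (t - tolerance) 0 s.length < s.length ∧
        s.getD (pvBisect s (t - tolerance) 0 s.length) 0 ≤ t + tolerance)
        ↔ (true_changes.any (fun t_star => decide (|t - t_star| ≤ tolerance)) = true) := by
      rw [bisect_check_iff s t tolerance hsort]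
      simp only [List.any_eq_true, decide_eq_true_eq]
      constructor
      · rintro ⟨y, hy, hyt⟩; exact ⟨y, (hmem y).mp hy, hyt⟩
      · rintro ⟨y, hy, hyt⟩; exact ⟨y, (hmem y).mpr hy, hyt⟩
    by_cases hA : true_changes.any (fun t_star => decide (|t - t_star| ≤ tolerance)) = true
    · rw [if_pos hA, if_pos (hiff.mpr hA)]
    · rw [if_neg hA, if_neg (fun hc => hA (hiff.mp hc))]

-- ===== VERDICT (by name: the statement is the Claim_ definition above) =====
theorem false_alarm_count_spec : Claim_equal_false_alarm_count := by
  intro true_changes detected_changes tolerance _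
  unfold Spec_false_alarm_count false_alarm_count false_alarm_count_alt
  split_ifs with h
  · subst h; rfl
  · exact fold_eq (PySem.List.sorted true_changes (fun x => x) false) true_changes
      detected_changes tolerance 0
      (by simpa using PySem.List.sorted_pairwise true_changes (fun x => x))
      (fun y => PySem.List.mem_sorted true_changes (fun x => x) false y)
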